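-- pv_equiv track=rewrite | github.com/Jahnesta3rd/Mingus-2025 | scripts/test_bookmark_extraction.py | is_relevant_bookmark
-- ===== SOURCE A (Python) =====
-- FINANCIAL_KEYWORDS = [
--     'finance', 'financial', 'money', 'investment', 'investing', 'wealth', 'budget',
--     'saving', 'retirement', '401k', 'ira', 'stock', 'market', 'trading', 'portfolio',
--     'credit', 'debt', 'loan', 'mortgage', 'insurance', 'tax', 'taxes', 'accounting',
--     'banking', 'bank', 'credit union', 'payroll', 'salary', 'income', 'revenue',
--     'profit', 'loss', 'expense', 'cash', 'cashflow', 'dividend', 'interest',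
--     'compound', 'inflation', 'deflation', 'recession', 'economy', 'economic'
-- ]
--
-- CAREER_KEYWORDS = [
--     'career', 'job', 'employment', 'work', 'professional', 'business', 'entrepreneur',
--     'startup', 'company', 'corporate', 'office', 'workplace', 'leadership', 'management',
--     'executive', 'ceo', 'cfo', 'cto', 'director', 'manager', 'supervisor', 'team',
--     'resume', 'cv', 'interview', 'hiring', 'recruitment', 'hr', 'human resources',
--     'salary', 'compensation', 'benefits', 'promotion', 'advancement', 'skills',
--     'training', 'education', 'certification', 'degree', 'mba', 'phd', 'mentor',
--     'networking', 'linkedin', 'professional development', 'workshop', 'conference',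
--     'industry', 'sector', 'market', 'competition', 'strategy', 'planning'
-- ]
--
-- AFRICAN_AMERICAN_PROFESSIONAL_KEYWORDS = [
--     'diversity', 'inclusion', 'equity', 'black', 'african american', 'minority',
--     'representation', 'mentorship', 'networking', 'professional development',
--     'career advancement', 'leadership', 'executive', 'board', 'director',
--     'entrepreneur', 'business owner', 'startup', 'wealth building', 'financial literacy',
--     'community', 'advocacy', 'empowerment', 'success', 'achievement', 'excellence',
--     'role model', 'inspiration', 'motivation', 'perseverance', 'resilience'
-- ]
--
-- def is_relevant_bookmark(bookmark):
--     """Check if bookmark is relevant to financial/career content"""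
--     url = bookmark.get('url', '').lower()
--     title = bookmark.get('title', '').lower()
--
--     # Check for financial/career keywords
--     all_keywords = FINANCIAL_KEYWORDS + CAREER_KEYWORDS + AFRICAN_AMERICAN_PROFESSIONAL_KEYWORDS
--
--     for keyword in all_keywords:
--         if keyword in url or keyword in title:
--             return True
--
--     # Check for common financial/career domains
--     financial_domains = [
--         'bloomberg.com', 'reuters.com', 'wsj.com', 'ft.com', 'cnbc.com',
--         'marketwatch.com', 'yahoo.com/finance', 'finance.yahoo.com',
--         'morningstar.com', 'fool.com', 'investopedia.com', 'nerdwallet.com',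
--         'creditkarma.com', 'mint.com', 'personalcapital.com', 'betterment.com',
--         'wealthfront.com', 'robinhood.com', 'tdameritrade.com', 'fidelity.com',
--         'vanguard.com', 'schwab.com', 'etrade.com', 'linkedin.com',
--         'glassdoor.com', 'indeed.com', 'monster.com', 'careerbuilder.com',
--         'ziprecruiter.com', 'dice.com', 'angel.co', 'crunchbase.com'
--     ]
--
--     for domain in financial_domains:
--         if domain in url:
--             return True
--
--     return False
-- ===== SOURCE B (Python) =====
-- # All keyword/domain patterns are stored as single '|'-joined strings, split once at
-- # import time, and matching is done by a position-major scan: a first-character index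
-- # (dict: char -> patterns starting with it) is consulted at each position of the text.
--
-- _KEYWORD_DATA = (
--     'finance|financial|money|investment|investing|wealth|budget|saving|retirement|401k|ira|stock|market|trading|portfolio|credit|debt|loan|mortgage|insurance|tax|taxes|accounting|banking|bank|credit union|payroll|salary|income|revenue|profit|loss|expense|cash|cashflow|dividend|interest|compound|inflation|deflation|recession|economy|economic|career|job|employment|work|professional|business|entrepreneur|startup|company|corporate|office|workplace|leadership|management|executive|ceo|cfo|cto|director|manager|supervisor|team|resume|cv|interview|hiring|recruitment|hr|human resources|salary|compensation|benefits|promotion|advancement|skills|training|education|certification|degree|mba|phd|mentor|networking|linkedin|professional development|workshop|conference|industry|sector|market|competition|strategy|planning|diversity|inclusion|equity|black|african american|minority|representation|mentorship|networking|professional development|career advancement|leadership|executive|board|director|entrepreneur|business owner|startup|wealth building|financial literacy|community|advocacy|empowerment|success|achievement|excellence|role model|inspiration|motivation|perseverance|resilience'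
-- )
--
-- _DOMAIN_DATA = (
--     'bloomberg.com|reuters.com|wsj.com|ft.com|cnbc.com|marketwatch.com|yahoo.com/finance|finance.yahoo.com|morningstar.com|fool.com|investopedia.com|nerdwallet.com|creditkarma.com|mint.com|personalcapital.com|betterment.com|wealthfront.com|robinhood.com|tdameritrade.com|fidelity.com|vanguard.com|schwab.com|etrade.com|linkedin.com|glassdoor.com|indeed.com|monster.com|careerbuilder.com|ziprecruiter.com|dice.com|angel.co|crunchbase.com'
-- )
--
--
-- def _first_char_index(data):
--     """Split the '|'-joined pattern string and group patterns by first character."""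
--     index = {}
--     for p in data.split('|'):
--         if p:
--             index.setdefault(p[0], []).append(p)
--     return index
--
--
-- _KW_INDEX = _first_char_index(_KEYWORD_DATA)
-- _DOM_INDEX = _first_char_index(_DOMAIN_DATA)
--
--
-- def _scan(index, text):
--     """Single left-to-right pass: at each position try only the patterns
--     whose first character matches the character there."""
--     for i, ch in enumerate(text):
--         for p in index.get(ch, ()):
--             if text.startswith(p, i):
--                 return True
--     return False
--
--
-- def is_relevant_bookmark(bookmark):
--     url = bookmark.get('url', '').lower()
--     title = bookmark.get('title', '').lower()
--     return _scan(_KW_INDEX, url) or _scan(_KW_INDEX, title) or _scan(_DOM_INDEX, url)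
-- ===== Notes on version B (the rewrite author's own statement) =====
-- stated objective: alternative
-- what changed: The pattern data is kept as single '|'-joined strings split once at startup, and A's keyword-major loops (each keyword scanned through url and title by 'in') are replaced by a precomputed first-character hash index and a single position-major left-to-right scan of each string that only tries the patterns starting with the character at that position.
import Mathlib
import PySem

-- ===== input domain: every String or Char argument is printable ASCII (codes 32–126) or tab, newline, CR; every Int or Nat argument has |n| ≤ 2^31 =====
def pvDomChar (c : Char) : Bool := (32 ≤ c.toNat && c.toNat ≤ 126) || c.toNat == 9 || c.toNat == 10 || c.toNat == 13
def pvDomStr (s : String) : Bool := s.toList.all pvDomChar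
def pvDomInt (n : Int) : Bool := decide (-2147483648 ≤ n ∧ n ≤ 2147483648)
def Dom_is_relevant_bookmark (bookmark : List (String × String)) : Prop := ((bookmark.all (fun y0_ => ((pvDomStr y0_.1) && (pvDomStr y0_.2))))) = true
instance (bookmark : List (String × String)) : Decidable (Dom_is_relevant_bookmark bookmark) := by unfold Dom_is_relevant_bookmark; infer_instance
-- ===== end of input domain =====

-- B stores the patterns as '|'-joined strings split once at startup and replaces A's
-- keyword-major substring loops by a first-character index consulted during a single
-- position-major scan of each string (objective: alternative).

-- ===== PORT A =====
-- A's module-level keyword lists, verbatim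
def FINANCIAL_KEYWORDS : List String := [
    "finance", "financial", "money", "investment", "investing", "wealth", "budget",
    "saving", "retirement", "401k", "ira", "stock", "market", "trading", "portfolio",
    "credit", "debt", "loan", "mortgage", "insurance", "tax", "taxes", "accounting",
    "banking", "bank", "credit union", "payroll", "salary", "income", "revenue",
    "profit", "loss", "expense", "cash", "cashflow", "dividend", "interest",
    "compound", "inflation", "deflation", "recession", "economy", "economic"]

def CAREER_KEYWORDS : List String := [
    "career", "job", "employment", "work", "professional", "business", "entrepreneur",
    "startup", "company", "corporate", "office", "workplace", "leadership", "management",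
    "executive", "ceo", "cfo", "cto", "director", "manager", "supervisor", "team",
    "resume", "cv", "interview", "hiring", "recruitment", "hr", "human resources",
    "salary", "compensation", "benefits", "promotion", "advancement", "skills",
    "training", "education", "certification", "degree", "mba", "phd", "mentor",
    "networking", "linkedin", "professional development", "workshop", "conference",
    "industry", "sector", "market", "competition", "strategy", "planning"]

def AFRICAN_AMERICAN_PROFESSIONAL_KEYWORDS : List String := [
    "diversity", "inclusion", "equity", "black", "african american", "minority",
    "representation", "mentorship", "networking", "professional development",
    "career advancement", "leadership", "executive", "board", "director",
    "entrepreneur", "business owner", "startup", "wealth building", "financial literacy",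
    "community", "advocacy", "empowerment", "success", "achievement", "excellence",
    "role model", "inspiration", "motivation", "perseverance", "resilience"]

def FINANCIAL_DOMAINS : List String := [
    "bloomberg.com", "reuters.com", "wsj.com", "ft.com", "cnbc.com",
    "marketwatch.com", "yahoo.com/finance", "finance.yahoo.com",
    "morningstar.com", "fool.com", "investopedia.com", "nerdwallet.com",
    "creditkarma.com", "mint.com", "personalcapital.com", "betterment.com",
    "wealthfront.com", "robinhood.com", "tdameritrade.com", "fidelity.com",
    "vanguard.com", "schwab.com", "etrade.com", "linkedin.com",
    "glassdoor.com", "indeed.com", "monster.com", "careerbuilder.com",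
    "ziprecruiter.com", "dice.com", "angel.co", "crunchbase.com"]

-- 'for keyword in …: if keyword in url or keyword in title: return True' → List.any (same per-keyword tests, same order)
def is_relevant_bookmark (bookmark : List (String × String)) : Bool :=
  let url := PySem.Str.lower ((PySem.Dict.mk bookmark).getD "url" "")
  let title := PySem.Str.lower ((PySem.Dict.mk bookmark).getD "title" "")
  let all_keywords := FINANCIAL_KEYWORDS ++ CAREER_KEYWORDS ++ AFRICAN_AMERICAN_PROFESSIONAL_KEYWORDS
  if all_keywords.any (fun keyword => PySem.Str.isIn keyword url || PySem.Str.isIn keyword title) then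
    true
  else if FINANCIAL_DOMAINS.any (fun domain => PySem.Str.isIn domain url) then
    true
  else
    false

-- ===== PORT B =====
-- Source B's module-level '|'-joined pattern data, verbatim
def pvKeywordData : String :=
  "finance|financial|money|investment|investing|wealth|budget|saving|retirement|401k|ira|stock|market|trading|portfolio|credit|debt|loan|mortgage|insurance|tax|taxes|accounting|banking|bank|credit union|payroll|salary|income|revenue|profit|loss|expense|cash|cashflow|dividend|interest|compound|inflation|deflation|recession|economy|economic|career|job|employment|work|professional|business|entrepreneur|startup|company|corporate|office|workplace|leadership|management|executive|ceo|cfo|cto|director|manager|supervisor|team|resume|cv|interview|hiring|recruitment|hr|human resources|salary|compensation|benefits|promotion|advancement|skills|training|education|certification|degree|mba|phd|mentor|networking|linkedin|professional development|workshop|conference|industry|sector|market|competition|strategy|planning|diversity|inclusion|equity|black|african american|minority|representation|mentorship|networking|professional development|career advancement|leadership|executive|board|director|entrepreneur|business owner|startup|wealth building|financial literacy|community|advocacy|empowerment|success|achievement|excellence|role model|inspiration|motivation|perseverance|resilience"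

def pvSiteData : String :=
  "bloomberg.com|reuters.com|wsj.com|ft.com|cnbc.com|marketwatch.com|yahoo.com/finance|finance.yahoo.com|morningstar.com|fool.com|investopedia.com|nerdwallet.com|creditkarma.com|mint.com|personalcapital.com|betterment.com|wealthfront.com|robinhood.com|tdameritrade.com|fidelity.com|vanguard.com|schwab.com|etrade.com|linkedin.com|glassdoor.com|indeed.com|monster.com|careerbuilder.com|ziprecruiter.com|dice.com|angel.co|crunchbase.com"

-- Source B's _first_char_index: split the data on '|', group non-empty patterns by first
-- character; 'index.setdefault(p[0], []).append(p)' is Dict.modify with default []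
def pvFirstCharIndex (data : String) : PySem.Dict Char (List (List Char)) :=
  (PySem.Chars.splitOn data.toList "|".toList).foldl
    (fun index p =>
      match p with
      | [] => index
      | c :: _ => index.modify c [] (fun l => l ++ [p]))
    PySem.Dict.empty

def pvKwIndex : PySem.Dict Char (List (List Char)) := pvFirstCharIndex pvKeywordData
def pvSiteIndex : PySem.Dict Char (List (List Char)) := pvFirstCharIndex pvSiteData

-- Source B's _scan; 'text.startswith(p, i)' with 0 ≤ i is exactly startswith on text.drop i
def pvScan (index : PySem.Dict Char (List (List Char))) (text : List Char) : Bool :=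
  (PySem.List.enumerate text).any (fun ic =>
    (index.getD ic.2 []).any (fun p => PySem.Chars.startswith (text.drop ic.1.toNat) p))

def is_relevant_bookmark_alt (bookmark : List (String × String)) : Bool :=
  let url := (PySem.Str.lower ((PySem.Dict.mk bookmark).getD "url" "")).toList
  let title := (PySem.Str.lower ((PySem.Dict.mk bookmark).getD "title" "")).toList
  pvScan pvKwIndex url || pvScan pvKwIndex title || pvScan pvSiteIndex url

-- ===== PRECONDITION & SPEC =====
def Spec_is_relevant_bookmark (bookmark : List (String × String)) (out : Bool) : Prop := out = is_relevant_bookmark_alt bookmark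
instance (bookmark : List (String × String)) (out : Bool) : Decidable (Spec_is_relevant_bookmark bookmark out) := by unfold Spec_is_relevant_bookmark; infer_instance

-- ===== CLAIM (what is proved, stated in full; the proofs are below) =====
def Claim_equal_is_relevant_bookmark : Prop := ∀ (bookmark : List (String × String)), Dom_is_relevant_bookmark bookmark → Spec_is_relevant_bookmark bookmark (is_relevant_bookmark bookmark)

-- ===== LEMMAS AND PROOFS =====

-- what the first-character index holds: p is filed under c iff p ∈ patterns and p starts with c
theorem mem_foldl_index (pats : List (List Char)) (d : PySem.Dict Char (List (List Char)))
    (c : Char) (p : List Char) :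
    (p ∈ (pats.foldl
      (fun index p =>
        match p with
        | [] => index
        | ch :: _ => index.modify ch [] (fun l => l ++ [p])) d).getD c [])
    ↔ p ∈ d.getD c [] ∨ (p ∈ pats ∧ ∃ t, p = c :: t) := by
  induction pats generalizing d with
  | nil => simp
  | cons q qs ih =>
    rw [List.foldl_cons, ih]
    cases q with
    | nil =>
      constructor
      · rintro (h | ⟨hq, t, ht⟩)
        · exact Or.inl h
        · exact Or.inr ⟨List.mem_cons_of_mem _ hq, t, ht⟩
      · rintro (h | ⟨hq, t, ht⟩)
        · exact Or.inl h
        · rcases List.mem_cons.mp hq with rfl | hq'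
          · simp at ht
          · exact Or.inr ⟨hq', t, ht⟩
    | cons a u =>
      by_cases hca : c = a
      · subst hca
        rw [PySem.Dict.getD_modify_self]
        constructor
        · rintro (h | ⟨hq, t, ht⟩)
          · rcases List.mem_append.mp h with h' | h'
            · exact Or.inl h'
            · have hp' := List.mem_singleton.mp h'
              exact Or.inr ⟨List.mem_cons.mpr (Or.inl hp'), u, hp'⟩
          · exact Or.inr ⟨List.mem_cons_of_mem _ hq, t, ht⟩
        · rintro (h | ⟨hq, t, ht⟩)
          · exact Or.inl (List.mem_append.mpr (Or.inl h))
          · rcases List.mem_cons.mp hq with rfl | hq'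
            · exact Or.inl (List.mem_append.mpr (Or.inr (by simp)))
            · exact Or.inr ⟨hq', t, ht⟩
      · rw [PySem.Dict.getD_modify_of_ne _ _ _ hca]
        constructor
        · rintro (h | ⟨hq, t, ht⟩)
          · exact Or.inl h
          · exact Or.inr ⟨List.mem_cons_of_mem _ hq, t, ht⟩
        · rintro (h | ⟨hq, t, ht⟩)
          · exact Or.inl h
          · rcases List.mem_cons.mp hq with rfl | hq'
            · exact absurd (by injection ht with h1 _; exact h1.symm) hca
            · exact Or.inr ⟨hq', t, ht⟩

theorem mem_firstCharIndex (data : String) (c : Char) (p : List Char) :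
    p ∈ (pvFirstCharIndex data).getD c []
    ↔ p ∈ PySem.Chars.splitOn data.toList "|".toList ∧ ∃ t, p = c :: t := by
  unfold pvFirstCharIndex
  rw [mem_foldl_index]
  simp [PySem.Dict.getD_empty]

-- the position-major scan finds exactly the (non-empty) patterns occurring as substrings
theorem pvScan_iff (data : String) (text : List Char) :
    pvScan (pvFirstCharIndex data) text = true
    ↔ ∃ p ∈ PySem.Chars.splitOn data.toList "|".toList, p ≠ [] ∧ p <:+: text := by
  unfold pvScan
  simp only [List.any_eq_true, PySem.List.mem_enumerate_iff, mem_firstCharIndex,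
    PySem.Chars.startswith_iff]
  constructor
  · rintro ⟨⟨i, ch⟩, ⟨k, hk, hik⟩, p, ⟨hp, t, ht⟩, hpre⟩
    obtain ⟨rfl, rfl⟩ : i = (0 : Int) + k ∧ ch = text[k] := by
      constructor <;> simp [Prod.ext_iff] at hik <;> simp [hik]
    refine ⟨p, hp, by simp [ht], ?_⟩
    rw [List.infix_iff_prefix_suffix]
    refine ⟨text.drop k, ?_, List.drop_suffix _ _⟩
    simpa using hpre
  · rintro ⟨p, hp, hne, hinf⟩
    obtain ⟨j, hpre⟩ := (PySem.Chars.exists_prefix_drop_iff_isIn p text).mpr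
      ((PySem.Chars.isIn_iff_infix p text).mpr hinf)
    obtain ⟨c, u, rfl⟩ := List.exists_cons_of_ne_nil hne
    have hjlt : j < text.length := by
      by_contra hge
      have : text.drop j = [] := List.drop_eq_nil_of_le (le_of_not_gt (by omega))
      rw [this] at hpre
      exact hne (List.prefix_nil.mp hpre)
    have hhead : text[j] = c := by
      obtain ⟨r, hr⟩ := hpre
      have h9 : (text.drop j)[0]? = some c := by rw [← hr]; rfl
      rw [List.getElem?_drop] at h9
      simpa [List.getElem?_eq_getElem hjlt] using h9
    refine ⟨((0 : Int) + j, text[j]), ⟨j, hjlt, rfl⟩, c :: u, ⟨hp, u, by rw [hhead]⟩, ?_⟩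
    rw [hhead]
    simpa using hpre

-- the '|'-joined data splits into exactly A's keyword / domain lists
set_option maxRecDepth 100000 in
set_option maxHeartbeats 2000000 in
theorem splitOn_keyword_data :
    PySem.Chars.splitOn pvKeywordData.toList "|".toList
    = (FINANCIAL_KEYWORDS ++ CAREER_KEYWORDS ++ AFRICAN_AMERICAN_PROFESSIONAL_KEYWORDS).map String.toList := by
  decide

set_option maxRecDepth 100000 in
set_option maxHeartbeats 2000000 in
theorem splitOn_domain_data :
    PySem.Chars.splitOn pvSiteData.toList "|".toList = FINANCIAL_DOMAINS.map String.toList := by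
  decide

-- specialization: scanning with the index over a keyword list of non-empty strings
theorem pvScan_data_iff (data : String) (kws : List String)
    (hd : PySem.Chars.splitOn data.toList "|".toList = kws.map String.toList)
    (h : ∀ k ∈ kws, k ≠ "") (s : String) :
    pvScan (pvFirstCharIndex data) s.toList = true
    ↔ ∃ k ∈ kws, PySem.Str.isIn k s = true := by
  rw [pvScan_iff, hd]
  constructor
  · rintro ⟨p, hp, _, hinf⟩
    obtain ⟨k, hk, rfl⟩ := List.mem_map.mp hp
    exact ⟨k, hk, (PySem.Str.isIn_iff_infix k s).mpr hinf⟩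
  · rintro ⟨k, hk, hin⟩
    refine ⟨k.toList, List.mem_map.mpr ⟨k, hk, rfl⟩, ?_, (PySem.Str.isIn_iff_infix k s).mp hin⟩
    intro hnil
    exact h k hk (String.toList_eq_nil_iff.mp hnil)

-- ===== VERDICT (by name: the statement is the Claim_ definition above) =====
set_option maxRecDepth 20000 in
theorem is_relevant_bookmark_spec : Claim_equal_is_relevant_bookmark := by
  intro bookmark _
  unfold Spec_is_relevant_bookmark is_relevant_bookmark is_relevant_bookmark_alt
  simp only []
  set url := PySem.Str.lower ((PySem.Dict.mk bookmark).getD "url" "") with hurl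
  set title := PySem.Str.lower ((PySem.Dict.mk bookmark).getD "title" "") with htitle
  have hkw : ∀ k ∈ FINANCIAL_KEYWORDS ++ CAREER_KEYWORDS ++ AFRICAN_AMERICAN_PROFESSIONAL_KEYWORDS, k ≠ "" := by decide
  have hdom : ∀ k ∈ FINANCIAL_DOMAINS, k ≠ "" := by decide
  rw [Bool.eq_iff_iff]
  simp only [pvKwIndex, pvSiteIndex, Bool.or_eq_true,
    pvScan_data_iff _ _ splitOn_keyword_data hkw,
    pvScan_data_iff _ _ splitOn_domain_data hdom]
  constructor
  · intro h
    split_ifs at h with h1 h2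
    · obtain ⟨k, hk, hin⟩ := List.any_eq_true.mp h1
      rcases (by simpa using hin :
          PySem.Str.isIn k url = true ∨ PySem.Str.isIn k title = true) with hu | ht
      · exact Or.inl (Or.inl ⟨k, hk, hu⟩)
      · exact Or.inl (Or.inr ⟨k, hk, ht⟩)
    · exact Or.inr (List.any_eq_true.mp h2)
  · intro h
    split_ifs with h1 h2
    · rfl
    · rfl
    · exfalso
      rcases h with (⟨k, hk, hin⟩ | ⟨k, hk, hin⟩) | ⟨k, hk, hin⟩
      · exact h1 (List.any_eq_true.mpr ⟨k, hk, by
          simp only [PySem.Str.isIn_eq] at hin ⊢; simp [hin]⟩)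
      · exact h1 (List.any_eq_true.mpr ⟨k, hk, by
          simp only [PySem.Str.isIn_eq] at hin ⊢; simp [hin]⟩)
      · exact h2 (List.any_eq_true.mpr ⟨k, hk, hin⟩)
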